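-- pv_equiv track=rewrite | github.com/malcolmsailor/dumb_composer | dumb_composer/pitch_utils/intervals.py | get_relative_chord_factors
-- ===== SOURCE A (Python) =====
-- import typing as t
--
-- def get_relative_chord_factors(
--     chord_factor: int, chord_intervals: t.Tuple[int, ...], scale_card: int
-- ) -> t.Tuple[int]:
--     """Given a chord factor expressed as a generic interval above the root,
--     return a tuple of generic intervals to the other factors of the chord,
--     both up and down.
--
--     >>> get_relative_chord_factors(0, (0, 2, 4), 7)
--     (-5, -3, 2, 4)
--     >>> get_relative_chord_factors(2, (0, 2, 5), 8)
--     (-5, -2, 3, 6)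
--     """
--     up = tuple(
--         sorted(
--             (other_factor - chord_factor) % scale_card
--             for other_factor in chord_intervals
--             if other_factor != chord_factor
--         )
--     )
--
--     down = tuple(f - scale_card for f in up)
--     return down + up
-- ===== SOURCE B (Python) =====
-- def get_relative_chord_factors(chord_factor, chord_intervals, scale_card):
--     # Build the final result directly by inserting each interval (down and up
--     # variant) into its sorted position: an online insertion sort, no sorted().
--     res = []
--     for other_factor in chord_intervals:
--         if other_factor == chord_factor:
--             continue
--         m = (other_factor - chord_factor) % scale_card
--         for v in (m - scale_card, m):
--             i = 0
--             while i < len(res) and res[i] <= v: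
--                 i += 1
--             res.insert(i, v)
--     return tuple(res)
-- ===== Notes on version B (the rewrite author's own statement) =====
-- stated objective: alternative
-- what changed: B never calls sorted(): it builds the final combined list directly by an online insertion sort, inserting both m and m - scale_card for each factor into their sorted positions, replacing A's sort-the-up-half / map-down / concatenate staging.
-- outside the precondition, e.g. on get_relative_chord_factors(0, (0, 2), 0): A raises ZeroDivisionError, B raises ZeroDivisionError; on get_relative_chord_factors(0, (0, 2, 4), -7): A returns (2, 4, -5, -3), B returns (-5, -3, 2, 4)
import Mathlib
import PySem

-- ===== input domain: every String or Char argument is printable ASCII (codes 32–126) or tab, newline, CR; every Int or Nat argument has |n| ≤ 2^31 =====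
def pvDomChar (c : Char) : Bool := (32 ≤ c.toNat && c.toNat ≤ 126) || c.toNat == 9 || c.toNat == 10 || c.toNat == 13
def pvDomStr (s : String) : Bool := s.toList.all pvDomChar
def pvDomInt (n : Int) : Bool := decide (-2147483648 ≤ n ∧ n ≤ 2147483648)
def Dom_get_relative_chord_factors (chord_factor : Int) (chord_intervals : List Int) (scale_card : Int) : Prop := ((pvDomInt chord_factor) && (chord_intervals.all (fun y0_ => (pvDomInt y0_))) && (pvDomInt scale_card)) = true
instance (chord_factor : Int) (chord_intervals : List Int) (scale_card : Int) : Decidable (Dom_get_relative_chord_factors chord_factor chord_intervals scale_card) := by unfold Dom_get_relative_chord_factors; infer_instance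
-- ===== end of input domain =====

-- B builds the result by an online insertion sort (each factor's up and down interval inserted
-- into sorted position), replacing A's sort-up / map-down / concatenate staging; objective: alternative.


-- ===== PORT A =====
def get_relative_chord_factors (chord_factor : Int) (chord_intervals : List Int) (scale_card : Int) : List Int :=
  let up := PySem.List.sorted
    ((chord_intervals.filter (fun other_factor => other_factor != chord_factor)).map
      (fun other_factor => PySem.Int.mod (other_factor - chord_factor) scale_card))
    (fun x => x) false
  let down := up.map (fun f => f - scale_card)
  down ++ up

-- ===== PORT B =====
-- the inner while/insert loop: skip elements ≤ v, insert v before the first element > v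
def pvInsSorted (v : Int) : List Int → List Int
  | [] => [v]
  | h :: t => if h ≤ v then h :: pvInsSorted v t else v :: h :: t

-- one iteration of B's outer loop
def pvStep (chord_factor scale_card : Int) (res : List Int) (other_factor : Int) : List Int :=
  if other_factor == chord_factor then res
  else
    let m := PySem.Int.mod (other_factor - chord_factor) scale_card
    pvInsSorted m (pvInsSorted (m - scale_card) res)

def get_relative_chord_factors_alt (chord_factor : Int) (chord_intervals : List Int) (scale_card : Int) : List Int :=
  chord_intervals.foldl (pvStep chord_factor scale_card) []

-- ===== PRECONDITION & SPEC =====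
-- Pre_ restricts to the natural domain of a positive scale cardinality: at scale_card = 0 A raises
-- ZeroDivisionError (whenever any other factor exists), and a negative scale_card is a nonsensical
-- scale size on which neither A's nor B's value is specified (Python's % sign convention makes
-- A's concatenation unsorted there, and B sorts).
def Pre_get_relative_chord_factors (chord_factor : Int) (chord_intervals : List Int) (scale_card : Int) : Prop := 1 ≤ scale_card
instance (chord_factor : Int) (chord_intervals : List Int) (scale_card : Int) : Decidable (Pre_get_relative_chord_factors chord_factor chord_intervals scale_card) := by unfold Pre_get_relative_chord_factors; infer_instance
def pvWitness_get_relative_chord_factors : Int × List Int × Int := (0, ([0, 2, 4], 7))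

def Spec_get_relative_chord_factors (chord_factor : Int) (chord_intervals : List Int) (scale_card : Int) (out : List Int) : Prop := out = get_relative_chord_factors_alt chord_factor chord_intervals scale_card
instance (chord_factor : Int) (chord_intervals : List Int) (scale_card : Int) (out : List Int) : Decidable (Spec_get_relative_chord_factors chord_factor chord_intervals scale_card out) := by unfold Spec_get_relative_chord_factors; infer_instance

-- ===== CLAIM (what is proved, stated in full; the proofs are below) =====
def Claim_equal_get_relative_chord_factors : Prop := ∀ (chord_factor : Int) (chord_intervals : List Int) (scale_card : Int), Dom_get_relative_chord_factors chord_factor chord_intervals scale_card → Pre_get_relative_chord_factors chord_factor chord_intervals scale_card → Spec_get_relative_chord_factors chord_factor chord_intervals scale_card (get_relative_chord_factors chord_factor chord_intervals scale_card)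

-- ===== LEMMAS AND PROOFS =====

theorem pvInsSorted_perm (v : Int) (l : List Int) : (pvInsSorted v l).Perm (v :: l) := by
  induction l with
  | nil => simp [pvInsSorted]
  | cons h t ih =>
    by_cases hle : h ≤ v
    · simpa [pvInsSorted, hle] using (List.Perm.cons h ih).trans (List.Perm.swap v h t)
    · simp [pvInsSorted, hle]

theorem pvInsSorted_pairwise (v : Int) (l : List Int)
    (hl : l.Pairwise (· ≤ ·)) : (pvInsSorted v l).Pairwise (· ≤ ·) := by
  induction l with
  | nil => simp [pvInsSorted]
  | cons h t ih =>
    rcases List.pairwise_cons.1 hl with ⟨hht, ht⟩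
    by_cases hle : h ≤ v
    · simp only [pvInsSorted, if_pos hle]
      refine List.pairwise_cons.2 ⟨?_, ih ht⟩
      intro x hx
      have hx' := (pvInsSorted_perm v t).mem_iff.1 hx
      rcases List.mem_cons.1 hx' with h1 | hxt
      · exact h1 ▸ hle
      · exact hht x hxt
    · simp only [pvInsSorted, if_neg hle]
      refine List.pairwise_cons.2 ⟨?_, hl⟩
      intro x hx
      rcases List.mem_cons.1 hx with rfl | hxt
      · omega
      · exact le_trans (by omega) (hht x hxt)

-- characterisation of B's fold: sorted, and a permutation of the two intervals per factor plus acc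
theorem pv_fold_char (cf sc : Int) (ci : List Int) :
    ∀ acc : List Int, acc.Pairwise (· ≤ ·) →
      (ci.foldl (pvStep cf sc) acc).Pairwise (· ≤ ·) ∧
      (ci.foldl (pvStep cf sc) acc).Perm
        ((ci.filter (fun f => f != cf)).flatMap
          (fun f => [PySem.Int.mod (f - cf) sc - sc, PySem.Int.mod (f - cf) sc]) ++ acc) := by
  induction ci with
  | nil =>
    intro acc hacc
    simp only [List.foldl_nil, List.filter_nil, List.flatMap_nil, List.nil_append]
    exact ⟨hacc, List.Perm.refl acc⟩
  | cons f t ih =>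
    intro acc hacc
    rw [List.foldl_cons]
    by_cases hf : f = cf
    · rw [show pvStep cf sc acc f = acc from by simp [pvStep, hf]]
      obtain ⟨h1, h2⟩ := ih acc hacc
      exact ⟨h1, h2.trans (by simp [hf])⟩
    · have hne : (f != cf) = true := by simp [hf]
      set m := PySem.Int.mod (f - cf) sc with hm
      have hstepeq : pvStep cf sc acc f = pvInsSorted m (pvInsSorted (m - sc) acc) := by
        simp [pvStep, hf, hm]
      rw [hstepeq]
      have hacc' : (pvInsSorted m (pvInsSorted (m - sc) acc)).Pairwise (· ≤ ·) :=
        pvInsSorted_pairwise _ _ (pvInsSorted_pairwise _ _ hacc)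
      obtain ⟨hsorted, hperm⟩ := ih _ hacc'
      refine ⟨hsorted, hperm.trans ?_⟩
      have hstep : (pvInsSorted m (pvInsSorted (m - sc) acc)).Perm ([m - sc, m] ++ acc) := by
        refine (pvInsSorted_perm m _).trans ?_
        refine (List.Perm.cons m (pvInsSorted_perm (m - sc) acc)).trans ?_
        simpa using List.Perm.swap (m - sc) m acc
      refine (List.Perm.append_left _ hstep).trans ?_
      rw [List.filter_cons, if_pos hne, List.flatMap_cons]
      refine (List.perm_append_comm_assoc _ _ _).trans ?_
      exact List.Perm.of_eq (by simp [hm])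

-- interleaved pair-list is a permutation of the two projections concatenated
theorem pv_flatMap_pair_perm {α β : Type} (l : List α) (f g : α → β) :
    (l.flatMap fun x => [f x, g x]).Perm (l.map f ++ l.map g) := by
  induction l with
  | nil => simp
  | cons a t ih =>
    simp only [List.flatMap_cons, List.map_cons, List.cons_append]
    exact List.Perm.cons _ ((List.Perm.cons _ ih).trans List.perm_middle.symm)

theorem get_relative_chord_factors_spec : Claim_equal_get_relative_chord_factors := by
  intro cf ci sc _ hpre
  unfold Spec_get_relative_chord_factors get_relative_chord_factors get_relative_chord_factors_alt
  have hsc : (0 : Int) < sc := hpre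
  set m : Int → Int := fun f => PySem.Int.mod (f - cf) sc with hm
  set L : List Int := (ci.filter (fun f => f != cf)).map m with hL
  set up : List Int := PySem.List.sorted L (fun x => x) false with hup
  set combined : List Int :=
    (ci.filter (fun f => f != cf)).flatMap (fun f => [m f - sc, m f]) with hcomb
  -- every element of up is in [0, sc)
  have hub : ∀ x ∈ up, 0 ≤ x ∧ x < sc := by
    intro x hx
    have hxL : x ∈ L := (PySem.List.mem_sorted _ _ _ _).1 hx
    rcases List.mem_map.1 hxL with ⟨f, _, rfl⟩
    exact ⟨PySem.Int.mod_nonneg _ hsc, PySem.Int.mod_lt _ hsc⟩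
  -- A's output is a permutation of `combined`
  have hApermComb : (up.map (fun f => f - sc) ++ up).Perm combined := by
    have h1 : combined.Perm
        ((ci.filter (fun f => f != cf)).map (fun f => m f - sc) ++ L) := by
      simpa [hL] using pv_flatMap_pair_perm (ci.filter (fun f => f != cf))
        (fun f => m f - sc) m
    have hupP : up.Perm L := PySem.List.sorted_perm ..
    have h2 : (up.map (fun f => f - sc)).Perm
        ((ci.filter (fun f => f != cf)).map (fun f => m f - sc)) := by
      have := hupP.map (fun f => f - sc)
      simpa [hL, List.map_map, Function.comp] using this
    exact (h2.append hupP).trans h1.symm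
  -- A's output is sorted
  have hAsorted : (up.map (fun f => f - sc) ++ up).Pairwise (· ≤ ·) := by
    apply List.pairwise_append.2
    refine ⟨?_, ?_, ?_⟩
    · have hP : up.Pairwise (fun a b => a ≤ b) := by
        simpa using PySem.List.sorted_pairwise (xs := L) (key := fun x => x)
      exact List.Pairwise.map _ (fun a b h => by omega) hP
    · simpa using PySem.List.sorted_pairwise (xs := L) (key := fun x => x)
    · intro a ha b hb
      rcases List.mem_map.1 ha with ⟨u, hu, rfl⟩
      have h1 := (hub u hu).2
      have h2 := (hub b hb).1
      omega
  -- B's output is sorted and a permutation of `combined`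
  obtain ⟨hBsorted, hBperm⟩ := pv_fold_char cf sc ci [] (by simp)
  rw [List.append_nil] at hBperm
  -- two sorted permutations of the same multiset of integers coincide
  refine List.Perm.eq_of_pairwise (fun a b _ _ h1 h2 => le_antisymm h1 h2) hAsorted hBsorted ?_
  exact (hApermComb.trans hBperm.symm).trans (List.Perm.refl _)
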